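-- pv_equiv track=rewrite | github.com/sarah-larkin/de-pairing-katas | src/sum_ascii.py | sum_ascii
-- ===== SOURCE A (Python) =====
-- def sum_ascii(names):
--     """
--     take a list of names
--     calculate each names score based on each character's ascii value
--     return the name with the highest score
--     """
--     #returns highest score only:
--     # name_scores = []
--     # score = 0
--     # for name in names:
--     #     name = name.lower()
--     #     for letter in name:
--     #         score += ord(letter)
--     #     name_scores.append(score)
--     # return max(name_scores)
--
--
-- #convert to dict, name being the keys
-- #calculate the ascii value and make the value for each key
-- #return the key with the highest value
--
--     name_dict = dict.fromkeys(names, 0)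
--
--     for name in names:
--         score = 0
--         for letter in name:
--             score += ord(letter.lower())
--         name_dict[name] = score
--     return max(name_dict, key=name_dict.get)
-- ===== SOURCE B (Python) =====
-- def sum_ascii(names):
--     """
--     take a list of names
--     calculate each names score based on each character's ascii value
--     return the name with the highest score
--     """
--     # One explicit best-so-far pass; the score is computed arithmetically:
--     # lowercasing an ASCII letter adds 32 to its code point, so
--     # ord(c.lower()) == ord(c) + (32 if 'A' <= c <= 'Z' else 0) on the ASCII domain.
--     best_name = None
--     best_score = None
--     for name in names:
--         score = 0
--         for c in name:
--             score += ord(c) + (32 if 'A' <= c <= 'Z' else 0)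
--         if best_score is None or score > best_score:
--             best_score = score
--             best_name = name
--     return best_name
-- ===== Notes on version B (the rewrite author's own statement) =====
-- stated objective: simpler
-- what changed: B drops both the dict and the max() built-in: it keeps an explicit (best_name, best_score) accumulator in one pass, and replaces per-character .lower() calls by ASCII arithmetic (ord(c) + 32 for 'A'..'Z'), which is exact on the printable-ASCII domain.
-- outside the precondition, e.g. on sum_ascii([]): A raises ValueError, B returns None
import Mathlib
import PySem

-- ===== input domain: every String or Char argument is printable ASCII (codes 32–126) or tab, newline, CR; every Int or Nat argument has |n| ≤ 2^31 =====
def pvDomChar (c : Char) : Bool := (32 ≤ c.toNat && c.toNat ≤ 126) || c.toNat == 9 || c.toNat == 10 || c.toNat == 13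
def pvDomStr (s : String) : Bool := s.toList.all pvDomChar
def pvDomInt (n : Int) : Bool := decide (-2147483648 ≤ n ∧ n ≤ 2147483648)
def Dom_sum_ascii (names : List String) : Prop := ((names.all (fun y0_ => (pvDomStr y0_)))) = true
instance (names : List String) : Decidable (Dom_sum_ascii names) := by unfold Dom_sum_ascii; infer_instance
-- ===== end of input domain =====

-- B replaces A's dict (fromkeys + fill loop + max over keys by lookup) with one explicit
-- best-so-far pass, scoring each name by ASCII arithmetic (ord(c)+32 for 'A'..'Z') instead
-- of per-character .lower() (simpler; exact on the ASCII domain).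

-- ===== PORT A =====
def sum_ascii (names : List String) : String :=
  -- name_dict = dict.fromkeys(names, 0)
  let name_dict : PySem.Dict String Int :=
    names.foldl (fun d n => d.insert n 0) PySem.Dict.empty
  -- for name in names: score = 0; for letter in name: score += ord(letter.lower()); name_dict[name] = score
  let name_dict : PySem.Dict String Int :=
    names.foldl (fun d name =>
      let score : Int :=
        name.toList.foldl (fun s letter => s + ((PySem.Chars.lowerChar letter).toNat : Int)) 0
      d.insert name score) name_dict
  -- max(name_dict, key=name_dict.get); max of an empty dict raises ValueError (excluded by Pre_)
  (PySem.List.max? name_dict.keys (fun k => name_dict.getD k 0)).getD ""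

-- ===== PORT B =====
def sum_ascii_alt (names : List String) : String :=
  -- explicit best-so-far loop; score by ASCII arithmetic (exact for lowerChar on all of Dom)
  let r : Option (String × Int) :=
    names.foldl (fun acc name =>
      let score : Int :=
        name.toList.foldl
          (fun s c => s + ((c.toNat : Int) + (if 'A' ≤ c ∧ c ≤ 'Z' then 32 else 0))) 0
      match acc with
      | none => some (name, score)
      | some (bn, bs) => if bs < score then some (name, score) else some (bn, bs)) none
  match r with
  | none => ""          -- empty input: A raises, excluded by Pre_
  | some (bn, _) => bn

-- ===== PRECONDITION & SPEC =====
-- Python's max raises ValueError on an empty sequence, so A raises exactly on []: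
def Pre_sum_ascii (names : List String) : Prop := names ≠ []
instance (names : List String) : Decidable (Pre_sum_ascii names) := by unfold Pre_sum_ascii; infer_instance
def pvWitness_sum_ascii : List String := ["abc", "XY z"]

def Spec_sum_ascii (names : List String) (out : String) : Prop := out = sum_ascii_alt names
instance (names : List String) (out : String) : Decidable (Spec_sum_ascii names out) := by unfold Spec_sum_ascii; infer_instance

-- ===== CLAIM (what is proved, stated in full; the proofs are below) =====
def Claim_equal_sum_ascii : Prop := ∀ (names : List String), Dom_sum_ascii names → Pre_sum_ascii names → Spec_sum_ascii names (sum_ascii names)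

-- ===== LEMMAS AND PROOFS =====

-- the score of one name, as A's inner loop computes it
def pvScore (n : String) : Int :=
  n.toList.foldl (fun s letter => s + ((PySem.Chars.lowerChar letter).toNat : Int)) 0

-- lowerChar is exactly "+32 on 'A'..'Z'" (for every Char)
theorem lowerChar_toNat (c : Char) :
    ((PySem.Chars.lowerChar c).toNat : Int)
      = (c.toNat : Int) + (if 'A' ≤ c ∧ c ≤ 'Z' then 32 else 0) := by
  by_cases h : 'A' ≤ c ∧ c ≤ 'Z'
  · have hle : c.toNat ≤ 90 := h.2
    have hvalid : Nat.isValidChar (c.toNat + 32) := Or.inl (by omega)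
    simp [PySem.Chars.lowerChar, PySem.Chars.isupper, h.1, h.2,
      Char.ofNat, hvalid, Char.ofNatAux]
    omega
  · have hiu : PySem.Chars.isupper c = false := by
      simp only [PySem.Chars.isupper, Bool.and_eq_false_iff, decide_eq_false_iff_not]
      by_cases h1 : 'A' ≤ c
      · exact Or.inr (fun h2 => h ⟨h1, h2⟩)
      · exact Or.inl h1
    simp [PySem.Chars.lowerChar, hiu, h]

-- B's inner scoring loop computes pvScore
theorem alt_score_eq (n : String) :
    n.toList.foldl
        (fun s c => s + ((c.toNat : Int) + (if 'A' ≤ c ∧ c ≤ 'Z' then 32 else 0))) 0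
      = pvScore n := by
  unfold pvScore
  have : ∀ (l : List Char) (init : Int),
      l.foldl (fun s c => s + ((c.toNat : Int) + (if 'A' ≤ c ∧ c ≤ 'Z' then 32 else 0))) init
        = l.foldl (fun s letter => s + ((PySem.Chars.lowerChar letter).toNat : Int)) init := by
    intro l
    induction l with
    | nil => intro init; rfl
    | cons c t ih => intro init; simp only [List.foldl_cons, lowerChar_toNat, ih]
  exact this n.toList 0

-- the step of PySem.List.max? (specialised to an Int-valued key)
def pvMStep {α : Type} (f : α → Int) (acc : Option α) (x : α) : Option α :=
  match acc with
  | none => some x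
  | some m => if f m < f x then some x else some m

theorem max?_eq_foldl_mstep {α : Type} (xs : List α) (f : α → Int) :
    PySem.List.max? xs f = xs.foldl (pvMStep f) none := rfl

theorem foldl_mstep_append {α : Type} (xs : List α) (x : α) (f : α → Int) (acc : Option α) :
    (xs ++ [x]).foldl (pvMStep f) acc = pvMStep f (xs.foldl (pvMStep f) acc) x := by
  simp [List.foldl_append]

-- max? over a key-congruent function
theorem foldl_mstep_congr {α : Type} (f g : α → Int) :
    ∀ (xs : List α) (acc : Option α), (∀ x ∈ xs, f x = g x) →
      (∀ m, acc = some m → f m = g m) →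
      xs.foldl (pvMStep f) acc = xs.foldl (pvMStep g) acc := by
  intro xs
  induction xs with
  | nil => intro acc _ _; rfl
  | cons x t ih =>
    intro acc hxs hacc
    have hx : f x = g x := hxs x (by simp)
    have ht : ∀ y ∈ t, f y = g y := fun y hy => hxs y (by simp [hy])
    simp only [List.foldl_cons]
    have hstep : pvMStep f acc x = pvMStep g acc x := by
      cases acc with
      | none => rfl
      | some m =>
        have hm := hacc m rfl
        simp [pvMStep, hm, hx]
    rw [hstep]
    apply ih _ ht
    intro m hm
    cases acc with
    | none =>
      simp [pvMStep] at hm; subst hm; exact hx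
    | some m' =>
      have hm' := hacc m' rfl
      by_cases h : g m' < g x
      · simp [pvMStep, h] at hm; subst hm; exact hx
      · simp [pvMStep, h] at hm; subst hm; exact hm'

theorem max?_congr {α : Type} (xs : List α) (f g : α → Int) (h : ∀ x ∈ xs, f x = g x) :
    PySem.List.max? xs f = PySem.List.max? xs g := by
  rw [max?_eq_foldl_mstep, max?_eq_foldl_mstep]
  exact foldl_mstep_congr f g xs none h (by intro m hm; cases hm)

-- first-max over the ordered dedup of xs equals first-max over xs
theorem max?_append_singleton {α : Type} (xs : List α) (x : α) (f : α → Int) :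
    PySem.List.max? (xs ++ [x]) f = pvMStep f (PySem.List.max? xs f) x := by
  rw [max?_eq_foldl_mstep, foldl_mstep_append, ← max?_eq_foldl_mstep]

theorem max?_ofList {α : Type} [BEq α] [LawfulBEq α] (f : α → Int) (xs : List α) :
    PySem.List.max? (PySem.Set.ofList xs) f = PySem.List.max? xs f := by
  induction xs using List.reverseRecOn with
  | nil => rfl
  | append_singleton t x ih =>
    have hof : PySem.Set.ofList (t ++ [x]) = PySem.Set.add (PySem.Set.ofList t) x := by
      simp [PySem.Set.ofList, List.foldl_append]
    by_cases hmem : x ∈ t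
    · have hL : PySem.Set.ofList (t ++ [x]) = PySem.Set.ofList t := by
        rw [hof]; simp [PySem.Set.add, hmem]
      obtain ⟨m, hm⟩ : ∃ m, PySem.List.max? t f = some m := by
        cases h : PySem.List.max? t f with
        | none => exact absurd ((PySem.List.max?_eq_none_iff t f).1 h ▸ hmem) (by simp)
        | some m => exact ⟨m, rfl⟩
      have hle : f x ≤ f m := PySem.List.max?_isMax hm x hmem
      rw [hL, ih, max?_append_singleton, hm]
      simp [pvMStep, not_lt.2 hle]
    · have hL : PySem.Set.ofList (t ++ [x]) = PySem.Set.ofList t ++ [x] := by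
        rw [hof]; simp [PySem.Set.add, hmem]
      rw [hL, max?_append_singleton, max?_append_singleton, ih]

-- updating a set with elements it already has changes nothing
theorem set_update_self {α : Type} [BEq α] [LawfulBEq α] :
    ∀ (l : List α) (s : PySem.Set α), (∀ x ∈ l, x ∈ s) → PySem.Set.update s l = s := by
  intro l
  induction l with
  | nil => intro s _; rfl
  | cons x t ih =>
    intro s h
    have hx : x ∈ s := h x (by simp)
    have hstep : PySem.Set.update s (x :: t) = PySem.Set.update (PySem.Set.add s x) t := rfl
    rw [hstep]
    have hadd : PySem.Set.add s x = s := by simp [PySem.Set.add, hx]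
    rw [hadd]
    exact ih s (fun y hy => h y (by simp [hy]))

-- the fill loop: final lookup is the score for every listed name
theorem getD_fill_loop :
    ∀ (l : List String) (d : PySem.Dict String Int) (k : String),
      (l.foldl (fun d n => d.insert n (pvScore n)) d).getD k 0 =
        if k ∈ l then pvScore k else d.getD k 0 := by
  intro l
  induction l with
  | nil => intro d k; simp
  | cons n t ih =>
    intro d k
    simp only [List.foldl_cons]
    rw [ih]
    by_cases ht : k ∈ t
    · simp [ht]
    · by_cases hn : k = n
      · subst hn; simp [ht, PySem.Dict.getD_insert_self]
      · simp [ht, hn, PySem.Dict.getD_insert]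

-- the keys of the final dict are the ordered dedup of names
theorem keys_final (names : List String) :
    ((names.foldl (fun d name =>
        d.insert name (pvScore name))
        (names.foldl (fun d n => d.insert n (0 : Int)) PySem.Dict.empty)).keys)
      = PySem.Set.ofList names := by
  rw [PySem.Dict.keys_foldl_insert, PySem.Dict.keys_foldl_insert]
  have h0 : PySem.Set.update (PySem.Dict.empty : PySem.Dict String Int).keys names
      = PySem.Set.ofList names := rfl
  rw [h0]
  exact set_update_self names (PySem.Set.ofList names)
    (fun x hx => (PySem.Set.mem_ofList names x).2 hx)

-- B's best-so-far fold is max? with the score carried alongside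
theorem alt_fold_eq :
    ∀ (xs : List String) (acc : Option String),
      xs.foldl (fun acc name =>
          let score : Int :=
            name.toList.foldl
              (fun s c => s + ((c.toNat : Int) + (if 'A' ≤ c ∧ c ≤ 'Z' then 32 else 0))) 0
          match acc with
          | none => some (name, score)
          | some (bn, bs) => if bs < score then some (name, score) else some (bn, bs))
        (acc.map (fun m => (m, pvScore m)))
      = (xs.foldl (pvMStep pvScore) acc).map (fun m => (m, pvScore m)) := by
  intro xs
  induction xs with
  | nil => intro acc; rfl
  | cons x t ih =>
    intro acc
    simp only [List.foldl_cons]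
    have hsx := alt_score_eq x
    have hstep :
        (match acc.map (fun m => (m, pvScore m)) with
          | none => some (x, x.toList.foldl
              (fun s c => s + ((c.toNat : Int) + (if 'A' ≤ c ∧ c ≤ 'Z' then 32 else 0))) 0)
          | some (bn, bs) =>
            if bs < x.toList.foldl
                (fun s c => s + ((c.toNat : Int) + (if 'A' ≤ c ∧ c ≤ 'Z' then 32 else 0))) 0
            then some (x, x.toList.foldl
                (fun s c => s + ((c.toNat : Int) + (if 'A' ≤ c ∧ c ≤ 'Z' then 32 else 0))) 0)
            else some (bn, bs))
        = (pvMStep pvScore acc x).map (fun m => (m, pvScore m)) := by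
      cases acc with
      | none => simp [pvMStep, hsx]
      | some m =>
        simp only [Option.map_some, pvMStep, hsx]
        by_cases h : pvScore m < pvScore x <;> simp [h]
    rw [hstep, ih]

-- ===== VERDICT (by name: the statement is the Claim_ definition above) =====
theorem sum_ascii_spec : Claim_equal_sum_ascii := by
  intro names _ _
  unfold Spec_sum_ascii sum_ascii sum_ascii_alt
  show (PySem.List.max?
      (names.foldl (fun d name => d.insert name (pvScore name))
        (names.foldl (fun d n => d.insert n (0 : Int)) PySem.Dict.empty)).keys
      (fun k => (names.foldl (fun d name => d.insert name (pvScore name))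
        (names.foldl (fun d n => d.insert n (0 : Int)) PySem.Dict.empty)).getD k 0)).getD ""
    = match names.foldl (fun acc name =>
          let score : Int :=
            name.toList.foldl
              (fun s c => s + ((c.toNat : Int) + (if 'A' ≤ c ∧ c ≤ 'Z' then 32 else 0))) 0
          match acc with
          | none => some (name, score)
          | some (bn, bs) => if bs < score then some (name, score) else some (bn, bs)) none with
      | none => ""
      | some (bn, _) => bn
  set dfin := names.foldl (fun d name => d.insert name (pvScore name))
      (names.foldl (fun d n => d.insert n (0 : Int)) PySem.Dict.empty) with hdfin
  have hB := alt_fold_eq names none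
  simp only [Option.map_none] at hB
  rw [hB, keys_final names]
  have h1 : PySem.List.max? (PySem.Set.ofList names) (fun k => dfin.getD k 0)
      = PySem.List.max? (PySem.Set.ofList names) pvScore := by
    apply max?_congr
    intro k hk
    have hkn : k ∈ names := (PySem.Set.mem_ofList names k).1 hk
    rw [hdfin, getD_fill_loop]
    simp [hkn]
  rw [h1, max?_ofList]
  rw [max?_eq_foldl_mstep]
  cases names.foldl (pvMStep pvScore) none with
  | none => rfl
  | some m => rfl
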